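-- pv_equiv track=rewrite | github.com/TetianaBolyukh/prg-basics | 04-Functions/7-19.py | f
-- ===== SOURCE A (Python) =====
-- def f(number):
--     count = {}
--     for digit in str(number):
--         if digit in count:
--             count[digit] += 1
--         else:
--             count[digit] = 1
--     sum = 0
--     for digit in count:
--         if count[digit] > 1:
--             sum += int(digit) * count[digit]
--     return sum
-- ===== SOURCE B (Python) =====
-- def f(number):
--     s = sorted(str(number))
--     return _runs(s)
--
-- def _runs(s):
--     if not s:
--         return 0
--     c = s[0]
--     run = 1
--     while run < len(s) and s[run] == c:
--         run += 1
--     rest = _runs(s[run:])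
--     if run > 1:
--         return int(c) * run + rest
--     return rest
-- ===== Notes on version B (the rewrite author's own statement) =====
-- stated objective: alternative
-- what changed: Replaces the frequency dictionary and its two dict passes with sort-then-scan: sort the characters of str(number) and recurse over contiguous runs of equal characters, adding int(c)*len(run) for each run longer than 1.
import Mathlib
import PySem

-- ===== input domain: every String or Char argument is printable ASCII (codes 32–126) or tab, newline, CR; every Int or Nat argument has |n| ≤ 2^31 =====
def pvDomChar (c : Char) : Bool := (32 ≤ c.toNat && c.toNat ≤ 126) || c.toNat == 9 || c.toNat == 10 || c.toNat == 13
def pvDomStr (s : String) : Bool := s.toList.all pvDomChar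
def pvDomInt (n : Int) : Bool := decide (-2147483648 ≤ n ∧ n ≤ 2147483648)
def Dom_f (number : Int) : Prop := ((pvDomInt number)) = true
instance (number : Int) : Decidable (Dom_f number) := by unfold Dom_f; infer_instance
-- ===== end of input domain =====

-- B replaces A's frequency dictionary and its two dict passes with sort-then-scan:
-- sort the characters of str(number), then recurse over contiguous runs of equal
-- characters, adding int(c)*len(run) for each run longer than 1 (objective: alternative).

-- ===== PORT A =====
-- Port of A: count chars of str(number) in an insertion-ordered dict, then sum
-- int(digit)*count over the keys whose count exceeds 1.  `int(digit)` is ported as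
-- (PySem.Int.ofChars? [digit]).getD 0: the default is unreachable, since only digit
-- characters can have count > 1 in str(number) (the '-' sign occurs at most once).
def f (number : Int) : Int :=
  let s := PySem.Int.toChars number
  let count := s.foldl (fun d digit =>
      if d.contains digit then d.insert digit (d.getD digit 0 + 1)
      else d.insert digit 1) PySem.Dict.empty
  count.keys.foldl (fun sum digit =>
      if count.getD digit 0 > 1 then
        sum + (PySem.Int.ofChars? [digit]).getD 0 * count.getD digit 0
      else sum) 0

-- ===== PORT B =====
-- Port of B's helper _runs: on non-empty s, the while loop counts the prefix run of
-- characters equal to s[0] (ported as 1 + length of takeWhile (== c) over the tail,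
-- the same count the loop computes), recurses on s[run:] (a drop, since 0 ≤ run ≤ len),
-- and adds int(c)*run when the run is longer than 1; `int(c)` is ported as
-- (PySem.Int.ofChars? [c]).getD 0 (the default unreachable as in A's port).
def pvRuns : List Char → Int
  | [] => 0
  | c :: t =>
    let run : Nat := 1 + (t.takeWhile (fun x => x == c)).length
    let rest := pvRuns ((c :: t).drop run)
    if (run : Int) > 1 then (PySem.Int.ofChars? [c]).getD 0 * run + rest else rest
termination_by s => s.length
decreasing_by simp

-- Port of B's f: sorted(str(number)) then the run scan.
def f_alt (number : Int) : Int :=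
  pvRuns (PySem.List.sorted (PySem.Int.toChars number) (fun c => c) false)

-- ===== PRECONDITION & SPEC =====
def Spec_f (number : Int) (out : Int) : Prop := out = f_alt number
instance (number : Int) (out : Int) : Decidable (Spec_f number out) := by unfold Spec_f; infer_instance

-- ===== CLAIM (what is proved, stated in full; the proofs are below) =====
def Claim_equal_f : Prop := ∀ (number : Int), Dom_f number → Spec_f number (f number)

-- ===== LEMMAS AND PROOFS =====

-- the common summand: contribution of character k given the char list s
def pvTerm (s : List Char) (k : Char) : Int :=
  if (s.count k : Int) > 1 then (PySem.Int.ofChars? [k]).getD 0 * (s.count k : Int) else 0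

-- pvTerm only depends on the multiset of s
lemma pvTerm_congr_perm {s s' : List Char} (h : s.Perm s') : pvTerm s = pvTerm s' := by
  funext k
  unfold pvTerm
  rw [h.count_eq]

lemma drop_length_takeWhile (p : Char → Bool) (t : List Char) :
    t.drop (t.takeWhile p).length = t.dropWhile p := by
  induction t with
  | nil => rfl
  | cons a t ih =>
      by_cases h : p a
      · simpa [h] using ih
      · simp [h]

-- on a sorted list whose elements all dominate c, c does not survive dropWhile (== c)
lemma not_mem_dropWhile_eq (c : Char) : ∀ (t : List Char), (∀ x ∈ t, c ≤ x) →
    t.Pairwise (· ≤ ·) → c ∉ t.dropWhile (fun x => x == c) := by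
  intro t
  induction t with
  | nil => intro _ _ h; simp at h
  | cons a t ih =>
      intro hge hp h
      by_cases ha : (a == c) = true
      · simp only [List.dropWhile_cons, if_pos ha] at h
        exact ih (fun x hx => hge x (List.mem_cons_of_mem a hx)) (List.pairwise_cons.mp hp).2 h
      · simp only [List.dropWhile_cons, if_neg ha] at h
        have hac : a ≠ c := by simpa using ha
        rcases List.mem_cons.mp h with h | h
        · exact hac h.symm
        · have h1 : a ≤ c := (List.pairwise_cons.mp hp).1 c h
          have h2 : c ≤ a := hge a (List.mem_cons_self)
          exact hac (le_antisymm h1 h2)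

-- A's dict-building loop is the Counter
lemma dict_loop_eq_counter (s : List Char) :
    s.foldl (fun d digit =>
      if d.contains digit then d.insert digit (d.getD digit 0 + 1)
      else d.insert digit 1) PySem.Dict.empty = PySem.Dict.counter s := by
  rw [← PySem.Dict.foldl_insert_getD_add_one_eq_counter]
  apply PySem.List.foldl_congr_mem
  intro d x _
  by_cases h : d.contains x
  · rw [if_pos h]
  · rw [if_neg h, PySem.Dict.getD_of_not_contains d 0 (by simpa using h)]
    norm_num

lemma foldl_term (s : List Char) (l : List Char) :
    l.foldl (fun acc k => if (s.count k : Int) > 1 then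
        acc + (PySem.Int.ofChars? [k]).getD 0 * (s.count k : Int) else acc) 0
      = (l.map (pvTerm s)).sum := by
  have h : ∀ (acc : Int) (k : Char), k ∈ l →
      (if (s.count k : Int) > 1 then
        acc + (PySem.Int.ofChars? [k]).getD 0 * (s.count k : Int) else acc)
      = acc + pvTerm s k := by
    intro acc k _
    unfold pvTerm
    split_ifs <;> simp
  rw [PySem.List.foldl_congr_mem l _ _ 0 h, PySem.List.foldl_add]
  simp

-- A computes the Finset sum of pvTerm over the distinct characters of s
lemma a_eq_finset_sum (s : List Char) :
    (PySem.Dict.counter s).keys.foldl (fun sum digit =>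
      if (PySem.Dict.counter s).getD digit 0 > 1 then
        sum + (PySem.Int.ofChars? [digit]).getD 0 * (PySem.Dict.counter s).getD digit 0
      else sum) 0 = s.toFinset.sum (pvTerm s) := by
  have hgetD : ∀ v, (PySem.Dict.counter s).getD v 0 = (s.count v : Nat) :=
    fun v => PySem.Dict.getD_counter s v
  have h1 : (PySem.Dict.counter s).keys.foldl (fun sum digit =>
      if (PySem.Dict.counter s).getD digit 0 > 1 then
        sum + (PySem.Int.ofChars? [digit]).getD 0 * (PySem.Dict.counter s).getD digit 0
      else sum) 0 = ((PySem.Set.ofList s).map (pvTerm s)).sum := by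
    rw [PySem.Dict.keys_counter s, ← foldl_term]
    apply PySem.List.foldl_congr_mem
    intro acc k _
    rw [hgetD k]
  rw [h1, ← List.sum_toFinset _ (PySem.Set.nodup_ofList s)]
  congr 1
  ext x
  simp [PySem.Set.mem_ofList]

-- B's run scan on a sorted list computes the same Finset sum
lemma runs_sorted : ∀ (n : Nat) (s : List Char), s.length ≤ n → s.Pairwise (· ≤ ·) →
    pvRuns s = s.toFinset.sum (pvTerm s) := by
  intro n
  induction n with
  | zero =>
      intro s hlen _
      have : s = [] := List.length_eq_zero_iff.mp (Nat.le_zero.mp hlen)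
      subst this
      rw [pvRuns]; simp
  | succ n ih =>
      intro s hlen hp
      cases s with
      | nil => rw [pvRuns]; simp
      | cons c t =>
          have hct : ∀ x ∈ t, c ≤ x := (List.pairwise_cons.mp hp).1
          have hpt : t.Pairwise (· ≤ ·) := (List.pairwise_cons.mp hp).2
          set tw := t.takeWhile (fun x => x == c) with htw
          set rest := t.dropWhile (fun x => x == c) with hrest
          have hdrop : (c :: t).drop (1 + tw.length) = rest := by
            rw [Nat.add_comm, List.drop_succ_cons, htw, drop_length_takeWhile]
          have htw_mem : ∀ x ∈ tw, x = c := by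
            intro x hx
            have := List.mem_takeWhile_imp hx
            simpa using this
          have hsplit : t = tw ++ rest := (List.takeWhile_append_dropWhile).symm
          have hc_rest : c ∉ rest := not_mem_dropWhile_eq c t hct hpt
          have hcount_c : (c :: t).count c = 1 + tw.length := by
            have htwc : tw.count c = tw.length :=
              List.count_eq_length.mpr (fun x hx => ((htw_mem x hx).symm ▸ rfl))
            rw [hsplit]
            simp [List.count_append, htwc,
              List.count_eq_zero_of_not_mem hc_rest]
            omega
          have hcount_ne : ∀ k, k ≠ c → (c :: t).count k = rest.count k := by
            intro k hk
            have htw0 : tw.count k = 0 :=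
              List.count_eq_zero_of_not_mem (fun h => hk (htw_mem k h))
            have hck : (c == k) = false := beq_eq_false_iff_ne.mpr (Ne.symm hk)
            rw [hsplit]
            simp [List.count_cons, List.count_append, htw0, hck]
          have hfin : (c :: t).toFinset = insert c rest.toFinset := by
            rw [hsplit]
            ext x
            simp only [List.toFinset_cons, List.toFinset_append, Finset.mem_insert,
              Finset.mem_union, List.mem_toFinset]
            constructor
            · rintro (h | h | h)
              · exact Or.inl h
              · exact Or.inl (htw_mem x h)
              · exact Or.inr (by simpa using h)
            · rintro (h | h)
              · exact Or.inl h
              · exact Or.inr (Or.inr (by simpa using h))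
          have hterm : ∀ k ∈ rest.toFinset, pvTerm (c :: t) k = pvTerm rest k := by
            intro k hk
            have hk' : k ∈ rest := List.mem_toFinset.mp hk
            have hkc : k ≠ c := fun h => hc_rest (h ▸ hk')
            unfold pvTerm
            rw [hcount_ne k hkc]
          have hrest_sub : rest.Sublist t := hrest ▸ List.dropWhile_sublist _
          have hrest_pair : rest.Pairwise (· ≤ ·) := hpt.sublist hrest_sub
          have hrest_len : rest.length ≤ n := by
            have h1 : rest.length ≤ t.length := hrest_sub.length_le
            have h2 : t.length ≤ n := by simpa using Nat.le_of_succ_le_succ (by simpa using hlen)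
            omega
          have hIH : pvRuns rest = rest.toFinset.sum (pvTerm rest) := ih rest hrest_len hrest_pair
          have hc_notfin : c ∉ rest.toFinset := fun h => hc_rest (List.mem_toFinset.mp h)
          have hsum : rest.toFinset.sum (pvTerm (c :: t)) = rest.toFinset.sum (pvTerm rest) :=
            Finset.sum_congr rfl hterm
          have hterm_c : pvTerm (c :: t) c =
              if ((1 + tw.length : Nat) : Int) > 1 then
                (PySem.Int.ofChars? [c]).getD 0 * ((1 + tw.length : Nat) : Int) else 0 := by
            unfold pvTerm
            rw [hcount_c]
          rw [pvRuns]
          rw [← htw, hdrop, hfin, Finset.sum_insert hc_notfin, hsum, ← hIH, hterm_c]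
          split_ifs with h
          · ring
          · simp

-- ===== VERDICT (by name: the statement is the Claim_ definition above) =====
theorem f_spec : Claim_equal_f := by
  intro number _
  unfold Spec_f f f_alt
  dsimp only
  set s := PySem.Int.toChars number with hs
  set sB := PySem.List.sorted s (fun c => c) false with hsB
  have hperm : sB.Perm s := PySem.List.sorted_perm s (fun c => c) false
  have hpair : sB.Pairwise (· ≤ ·) := by
    have := PySem.List.sorted_pairwise s (fun c => c)
    simpa using this
  have hfs : sB.toFinset = s.toFinset := by
    ext x
    simp [hperm.mem_iff]
  rw [dict_loop_eq_counter, a_eq_finset_sum, runs_sorted sB.length sB le_rfl hpair,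
    pvTerm_congr_perm hperm, hfs]
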